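-- pv_equiv track=rewrite | github.com/onehashai/onehash-cal | scripts/sim.py | winnow
-- ===== SOURCE A (Python) =====
-- from collections import deque
--
-- def winnow(hashes, w):
--     fingerprints = set()
--     window = deque()
--     min_hash = None
--
--     for i in range(len(hashes)):
--         if i >= w:
--             if window and hashes[i - w] == min_hash:
--                 min_hash = min(window)
--         window.append(hashes[i])
--         if len(window) > w:
--             window.popleft()
--         if len(window) == w:
--             min_h = min(window)
--             if min_h != min_hash:
--                 fingerprints.add(min_h)
--                 min_hash = min_h
--
--     return fingerprints
-- ===== SOURCE B (Python) =====
-- def winnow(hashes, w):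
--     if w < 1:
--         return set()
--     return {min(hashes[i:i + w]) for i in range(len(hashes) - w + 1)}
-- ===== Notes on version B (the rewrite author's own statement) =====
-- stated objective: simpler
-- what changed: Replaced A's incremental deque/min_hash state machine by a direct set-comprehension of the minima of all length-w slices (the min_hash bookkeeping only suppresses set.add calls that are no-ops anyway).
import Mathlib
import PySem

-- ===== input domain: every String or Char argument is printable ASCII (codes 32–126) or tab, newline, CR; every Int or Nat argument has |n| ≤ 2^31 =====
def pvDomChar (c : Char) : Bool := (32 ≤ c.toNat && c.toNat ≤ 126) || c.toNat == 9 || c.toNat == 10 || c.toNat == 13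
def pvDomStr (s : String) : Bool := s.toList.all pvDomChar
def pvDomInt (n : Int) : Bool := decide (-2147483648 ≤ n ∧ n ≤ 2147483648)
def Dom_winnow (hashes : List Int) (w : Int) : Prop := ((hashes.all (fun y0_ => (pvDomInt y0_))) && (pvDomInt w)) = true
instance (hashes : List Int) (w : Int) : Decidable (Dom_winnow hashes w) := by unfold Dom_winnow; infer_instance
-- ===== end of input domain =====

-- B replaces A's incremental deque/min_hash state machine by a direct set comprehension of
-- all length-w window minima (objective: simpler).

-- ===== PORT A =====
-- loop body of A's 'for i in range(len(hashes))', state = (fingerprints, window, min_hash)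
def winnowStep (hashes : List Int) (w : Int)
    (s : PySem.Set Int × List Int × Option Int) (i : Int) :
    PySem.Set Int × List Int × Option Int :=
  let fps := s.1
  let window := s.2.1
  let min_hash := s.2.2
  -- 'hashes[i - w] == min_hash': the index is in range whenever this branch runs (i ≥ w);
  -- comparing the Options models Python's 'int == None' being False
  let min_hash :=
    if i ≥ w ∧ window ≠ [] ∧ PySem.List.pyGet? hashes (i - w) = min_hash then
      PySem.List.min? window (fun y => y)
    else min_hash
  let window := window ++ [PySem.List.pyGetD hashes i 0]   -- hashes[i]: i is always in range here
  let window := if (window.length : Int) > w then window.drop 1 else window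
  if (window.length : Int) = w then
    -- min(window): window is nonempty here for every input admitted by Pre_winnow
    let min_h := (PySem.List.min? window (fun y => y)).getD 0
    if some min_h ≠ min_hash then (PySem.Set.add fps min_h, window, some min_h)
    else (fps, window, min_hash)
  else (fps, window, min_hash)

def winnow (hashes : List Int) (w : Int) : List Int :=
  ((PySem.List.pyRange 0 (hashes.length : Int) 1).foldl (winnowStep hashes w)
    (PySem.Set.empty, [], none)).1

-- ===== PORT B =====
def winnow_alt (hashes : List Int) (w : Int) : List Int :=
  if w < 1 then PySem.Set.empty
  else
    PySem.Set.ofList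
      ((PySem.List.pyRange 0 ((hashes.length : Int) - w + 1) 1).map
        (fun i =>
          (PySem.List.min? (PySem.List.slice hashes (some i) (some (i + w))) (fun y => y)).getD 0))

-- ===== PRECONDITION & SPEC =====
-- Pre_ excludes only w = 0 with non-empty hashes: there Python A raises ValueError (min of an
-- empty deque); A returns normally on every other input.
def Pre_winnow (hashes : List Int) (w : Int) : Prop := w ≠ 0 ∨ hashes = []
instance (hashes : List Int) (w : Int) : Decidable (Pre_winnow hashes w) := by
  unfold Pre_winnow; infer_instance
def pvWitness_winnow : List Int × Int := ([3, 1, 4, 1, 5], 2)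

def Spec_winnow (hashes : List Int) (w : Int) (out : List Int) : Prop := out = winnow_alt hashes w
instance (hashes : List Int) (w : Int) (out : List Int) : Decidable (Spec_winnow hashes w out) := by
  unfold Spec_winnow; infer_instance

-- ===== CLAIM (what is proved, stated in full; the proofs are below) =====
def Claim_equal_winnow : Prop := ∀ (hashes : List Int) (w : Int), Dom_winnow hashes w →
  Pre_winnow hashes w → Spec_winnow hashes w (winnow hashes w)
-- ===== LEMMAS AND PROOFS =====

-- the j-th full window and its minimum, the first-(k-steps) minima, A's deque and min_hash after k steps
def winWin (h : List Int) (wn j : Nat) : List Int := (h.drop j).take wn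
def minWin (h : List Int) (wn j : Nat) : Int :=
  (PySem.List.min? (winWin h wn j) (fun y => y)).getD 0
def minsPre (h : List Int) (wn k : Nat) : List Int := (List.range (k + 1 - wn)).map (minWin h wn)
def winAt (h : List Int) (wn k : Nat) : List Int := (h.take k).drop (k - wn)
def mhAt (h : List Int) (wn k : Nat) : Option Int :=
  if k < wn then none else PySem.List.min? (winAt h wn k) (fun y => y)

theorem winAt_eq_winWin (h : List Int) (wn k : Nat) (hk : wn ≤ k) :
    winAt h wn k = winWin h wn (k - wn) := by
  unfold winAt winWin
  rw [List.drop_take]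
  congr 1
  omega

theorem length_winAt (h : List Int) (wn k : Nat) (hk : k ≤ h.length) :
    (winAt h wn k).length = min k wn := by
  unfold winAt
  simp
  omega

theorem mhAt_some (h : List Int) (wn k : Nat) (h1 : 1 ≤ wn) (hwk : wn ≤ k) (hk : k ≤ h.length) :
    mhAt h wn k = some (minWin h wn (k - wn)) := by
  have hne : winAt h wn k ≠ [] := by
    have hl := length_winAt h wn k hk
    intro hnil
    rw [hnil] at hl
    simp at hl
    omega
  unfold mhAt
  rw [if_neg (by omega)]
  rcases hmm : PySem.List.min? (winAt h wn k) (fun y => y) with _ | m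
  · rw [PySem.List.min?_eq_none_iff] at hmm
    exact absurd hmm hne
  · unfold minWin
    rw [← winAt_eq_winWin h wn k hwk, hmm]
    rfl

theorem ofList_concat_eq_add (l : List Int) (x : Int) :
    PySem.Set.ofList (l ++ [x]) = PySem.Set.add (PySem.Set.ofList l) x := by
  simp [PySem.Set.ofList_eq_foldl, List.foldl_append]

theorem minsPre_succ (h : List Int) (wn k : Nat) (hwk : wn ≤ k + 1) :
    minsPre h wn (k + 1) = minsPre h wn k ++ [minWin h wn (k + 1 - wn)] := by
  unfold minsPre
  rw [show k + 1 + 1 - wn = (k + 1 - wn) + 1 from by omega, List.range_succ, List.map_append]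
  rfl

theorem stepMain (h : List Int) (wn : Nat) (h1 : 1 ≤ wn) (k : Nat) (hk : k < h.length) :
    winnowStep h (wn : Int)
      (PySem.Set.ofList (minsPre h wn k), winAt h wn k, mhAt h wn k) ((k : Nat) : Int)
    = (PySem.Set.ofList (minsPre h wn (k + 1)), winAt h wn (k + 1), mhAt h wn (k + 1)) := by
  have hkle : k ≤ h.length := hk.le
  have happ : winAt h wn k ++ [PySem.List.pyGetD h ((k : Nat) : Int) 0]
      = (h.take (k + 1)).drop (k - wn) := by
    rw [PySem.List.pyGetD_natCast]
    unfold winAt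
    rw [List.take_add_one, List.getElem?_eq_getElem hk,
        List.drop_append_of_le_length (by rw [List.length_take]; omega)]
    rw [List.getD_eq_getElem h 0 hk]
    rfl
  have hlen1 : ((h.take (k + 1)).drop (k - wn)).length = min k wn + 1 := by
    simp
    omega
  simp only [winnowStep]
  rw [happ]
  rcases Nat.lt_or_ge k wn with hlt | hge
  · -- k < wn : no recompute, no popleft
    have hmhk : mhAt h wn k = none := by unfold mhAt; rw [if_pos hlt]
    rw [if_neg (show ¬ (((k : Nat) : Int) ≥ ((wn : Nat) : Int) ∧ winAt h wn k ≠ [] ∧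
        PySem.List.pyGet? h (((k : Nat) : Int) - ((wn : Nat) : Int)) = mhAt h wn k) from
      fun hc => absurd hc.1 (by omega))]
    rw [if_neg (show ¬ ((((h.take (k + 1)).drop (k - wn)).length : Int) > ((wn : Nat) : Int)) from by
      rw [hlen1]; push_cast; omega)]
    have hwin : (h.take (k + 1)).drop (k - wn) = winAt h wn (k + 1) := by
      unfold winAt; congr 1; omega
    rw [hwin, hmhk]
    by_cases heq : k + 1 = wn
    · rw [if_pos (show (((winAt h wn (k + 1)).length : Int)) = ((wn : Nat) : Int) from by
        rw [length_winAt h wn (k + 1) hk]; push_cast; omega)]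
      have hmh : PySem.List.min? (winAt h wn (k + 1)) (fun y => y)
          = some (minWin h wn (k + 1 - wn)) := by
        have hs := mhAt_some h wn (k + 1) h1 (by omega) hk
        unfold mhAt at hs
        rwa [if_neg (by omega)] at hs
      rw [hmh]
      simp only [Option.getD_some]
      rw [if_pos (by simp)]
      have hm0 : minsPre h wn k = [] := by
        unfold minsPre
        rw [show k + 1 - wn = 0 from by omega]
        rfl
      rw [minsPre_succ h wn k (by omega), hm0]
      rw [mhAt_some h wn (k + 1) h1 (by omega) hk]
      rw [ofList_concat_eq_add]
    · rw [if_neg (show ¬ (((winAt h wn (k + 1)).length : Int)) = ((wn : Nat) : Int) from by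
        rw [length_winAt h wn (k + 1) hk]; push_cast; omega)]
      have hm01 : minsPre h wn k = minsPre h wn (k + 1) := by
        unfold minsPre
        rw [show k + 1 + 1 - wn = k + 1 - wn from by omega]
      have hmh1 : mhAt h wn (k + 1) = none := by unfold mhAt; rw [if_pos (by omega)]
      rw [hm01, hmh1]
  · -- wn ≤ k : recompute is a no-op, popleft happens
    have hmhk : mhAt h wn k = some (minWin h wn (k - wn)) := mhAt_some h wn k h1 hge hkle
    have hif1 : (if ((k : Nat) : Int) ≥ ((wn : Nat) : Int) ∧ winAt h wn k ≠ [] ∧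
          PySem.List.pyGet? h (((k : Nat) : Int) - ((wn : Nat) : Int)) = mhAt h wn k then
          PySem.List.min? (winAt h wn k) (fun y => y)
        else mhAt h wn k) = mhAt h wn k := by
      split_ifs with hc
      · unfold mhAt
        rw [if_neg (by omega)]
      · rfl
    rw [hif1]
    rw [if_pos (show (((h.take (k + 1)).drop (k - wn)).length : Int) > ((wn : Nat) : Int) from by
      rw [hlen1]; push_cast; omega)]
    have hdrop : ((h.take (k + 1)).drop (k - wn)).drop 1 = winAt h wn (k + 1) := by
      unfold winAt
      rw [List.drop_drop]
      congr 1
      omega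
    rw [hdrop]
    rw [if_pos (show (((winAt h wn (k + 1)).length : Int)) = ((wn : Nat) : Int) from by
      rw [length_winAt h wn (k + 1) hk]; push_cast; omega)]
    have hmh : PySem.List.min? (winAt h wn (k + 1)) (fun y => y)
        = some (minWin h wn (k + 1 - wn)) := by
      have hs := mhAt_some h wn (k + 1) h1 (by omega) hk
      unfold mhAt at hs
      rwa [if_neg (by omega)] at hs
    rw [hmh, hmhk]
    simp only [Option.getD_some]
    have hmem : minWin h wn (k - wn) ∈ PySem.Set.ofList (minsPre h wn k) := by
      rw [PySem.Set.mem_ofList]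
      unfold minsPre
      exact List.mem_map_of_mem (List.mem_range.mpr (by omega))
    by_cases hne : minWin h wn (k + 1 - wn) = minWin h wn (k - wn)
    · rw [if_neg (by simp [hne])]
      rw [mhAt_some h wn (k + 1) h1 (by omega) hk]
      rw [minsPre_succ h wn k (by omega), ofList_concat_eq_add, hne,
        PySem.Set.add_of_mem hmem]
    · rw [if_pos (by simp [hne])]
      rw [mhAt_some h wn (k + 1) h1 (by omega) hk]
      rw [minsPre_succ h wn k (by omega), ofList_concat_eq_add]

theorem foldA (h : List Int) (wn : Nat) (h1 : 1 ≤ wn) (k : Nat) (hk : k ≤ h.length) :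
    (PySem.List.pyRange 0 ((k : Nat) : Int) 1).foldl (winnowStep h (wn : Int))
      (PySem.Set.empty, [], none)
    = (PySem.Set.ofList (minsPre h wn k), winAt h wn k, mhAt h wn k) := by
  induction k with
  | zero =>
      rw [Nat.cast_zero, PySem.List.pyRange_one_eq_nil le_rfl]
      simp only [List.foldl_nil]
      unfold minsPre winAt mhAt
      rw [show 0 + 1 - wn = 0 from by omega, if_pos (by omega)]
      simp [PySem.Set.ofList_eq_foldl, PySem.Set.empty]
  | succ k ih =>
      rw [show ((k + 1 : Nat) : Int) = ((k : Nat) : Int) + 1 from by push_cast; ring,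
        PySem.List.pyRange_one_succ_right (Int.natCast_nonneg k), List.foldl_append,
        ih (by omega)]
      simp only [List.foldl_cons, List.foldl_nil]
      exact stepMain h wn h1 k (by omega)

theorem altEq (h : List Int) (wn : Nat) (h1 : 1 ≤ wn) :
    winnow_alt h (wn : Int)
    = PySem.Set.ofList ((List.range (h.length + 1 - wn)).map (minWin h wn)) := by
  unfold winnow_alt
  rw [if_neg (by omega)]
  rw [PySem.List.pyRange_one]
  rw [show ((h.length : Int) - (wn : Int) + 1 - 0).toNat = h.length + 1 - wn from by omega]
  rw [List.map_map]
  congr 1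
  apply List.map_congr_left
  intro j hj
  simp only [Function.comp_apply, zero_add]
  rw [PySem.List.slice_natCast_add]
  rfl

theorem stepNeg (h : List Int) (w : Int) (hw : w < 0) (i : Int) :
    winnowStep h w (PySem.Set.empty, [], none) i = (PySem.Set.empty, [], none) := by
  simp only [winnowStep]
  rw [if_neg (show ¬ (i ≥ w ∧ ([] : List Int) ≠ [] ∧
      PySem.List.pyGet? h (i - w) = (none : Option Int)) from fun hc => hc.2.1 rfl)]
  rw [if_pos (show (((([] : List Int) ++ [PySem.List.pyGetD h i 0]).length : Int)) > w from by
    simp; omega)]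
  rw [if_neg (show ¬ (((((([] : List Int) ++ [PySem.List.pyGetD h i 0]).drop 1)).length : Int)) = w from by
    simp; omega)]
  simp

-- ===== VERDICT (by name: the statement is the Claim_ definition above) =====
theorem winnow_spec : Claim_equal_winnow := by
  intro hashes w _ hpre
  unfold Spec_winnow
  by_cases hw1 : 1 ≤ w
  · lift w to ℕ using (by omega : (0 : Int) ≤ w) with wn
    have h1 : 1 ≤ wn := by exact_mod_cast hw1
    unfold winnow
    rw [foldA hashes wn h1 hashes.length le_rfl]
    rw [altEq hashes wn h1]
    rfl
  · rcases hpre with h0 | h0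
    · have hstep0 : ∀ (l : List Int),
          l.foldl (winnowStep hashes w) (PySem.Set.empty, [], none)
          = (PySem.Set.empty, [], none) := by
        intro l
        induction l with
        | nil => rfl
        | cons a t ih => rw [List.foldl_cons, stepNeg hashes w (by omega) a, ih]
      unfold winnow
      rw [hstep0]
      unfold winnow_alt
      rw [if_pos (by omega)]
    · subst h0
      unfold winnow winnow_alt
      rw [if_pos (by omega)]
      rw [show ((([] : List Int)).length : Int) = 0 from by simp,
        PySem.List.pyRange_one_eq_nil le_rfl]
      rfl
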